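-- pv_equiv track=rewrite | github.com/sndb/dive-into-algorithms | ch5/random_number_generators.py | feedback_shift_list
-- ===== SOURCE A (Python) =====
-- def feedback_shift(bits):
--     xor_result = (bits[1] + bits[2]) % 2
--     output = bits.pop()
--     bits.insert(0, xor_result)
--     return bits, output
--
-- def feedback_shift_list(bits_seed):
--     bits_output = [bits_seed.copy()]
--     random_output = []
--     bits_next = bits_seed.copy()
--
--     while len(bits_output) < 2 ** len(bits_seed):
--         bits_next, next = feedback_shift(bits_next)
--         bits_output += [bits_next.copy()]
--         random_output += [next]
--
--     return bits_output, random_output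
-- ===== SOURCE B (Python) =====
-- def feedback_shift_list(bits_seed):
--     n = len(bits_seed)
--     if n == 0:
--         return [bits_seed.copy()], []
--     # flat tape, oldest bit first, newest last
--     tape = bits_seed[::-1]
--     steps = 2 ** n - 1
--     for _ in range(steps):
--         tape.append((tape[-2] + tape[-3]) % 2)
--     states = [tape[k:k + n][::-1] for k in range(steps + 1)]
--     return states, tape[:steps]
-- ===== Notes on version B (the rewrite author's own statement) =====
-- stated objective: alternative
-- what changed: B replaces the per-step state mutation (pop + insert(0,..) on a fresh copy each iteration) by one flat bit tape extended with appends, from which all 2^n states are reconstructed as reversed length-n windows and the output bits read off as the tape's first 2^n-1 elements.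
import Mathlib
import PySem

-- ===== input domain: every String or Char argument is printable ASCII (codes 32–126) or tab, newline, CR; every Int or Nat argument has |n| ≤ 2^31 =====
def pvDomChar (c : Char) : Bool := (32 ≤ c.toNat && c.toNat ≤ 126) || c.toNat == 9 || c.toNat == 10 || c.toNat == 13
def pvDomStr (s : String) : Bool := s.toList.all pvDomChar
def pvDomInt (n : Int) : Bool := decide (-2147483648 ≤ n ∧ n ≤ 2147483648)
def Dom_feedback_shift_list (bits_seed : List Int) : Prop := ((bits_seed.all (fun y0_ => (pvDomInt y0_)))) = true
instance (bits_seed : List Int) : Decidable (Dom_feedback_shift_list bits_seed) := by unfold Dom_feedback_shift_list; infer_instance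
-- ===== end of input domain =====

-- B builds one flat bit tape by appending and reads the states off as reversed windows,
-- instead of A's per-step pop/insert on a fresh list copy; return value only, no argument is mutated.

-- ===== PORT A =====
def feedback_shift (bits : List Int) : Option (List Int × Int) :=
  match PySem.List.pyGet? bits 1, PySem.List.pyGet? bits 2 with
  | some b1, some b2 =>
      let xor_result := PySem.Int.mod (b1 + b2) 2
      match PySem.List.pop? bits with     -- bits.pop()  (default index -1)
      | some (output, rest) => some (PySem.List.insert rest 0 xor_result, output)
      | none => none
  | _, _ => none                           -- IndexError (len < 3)

-- the while-loop; fuel 2^len suffices, the loop condition is checked each round as in A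
def fsLoop : Nat → Nat → List (List Int) → List Int → List Int → List (List Int) × List Int
  | 0, _, bits_output, random_output, _ => (bits_output, random_output)
  | fuel + 1, target, bits_output, random_output, bits_next =>
    if bits_output.length < target then
      match feedback_shift bits_next with
      | some (bn, nxt) => fsLoop fuel target (bits_output ++ [bn]) (random_output ++ [nxt]) bn
      | none => (bits_output, random_output)   -- IndexError propagates (unreachable under Pre_)
    else (bits_output, random_output)

def feedback_shift_list (bits_seed : List Int) : List (List Int) × List Int :=
  fsLoop (2 ^ bits_seed.length) (2 ^ bits_seed.length) [bits_seed] [] bits_seed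

-- ===== PORT B =====
-- the append loop: tape.append((tape[-2] + tape[-3]) % 2), `steps` times
def fsTapeLoop : Nat → List Int → List Int
  | 0, tape => tape
  | k + 1, tape =>
    match PySem.List.pyGet? tape (-2), PySem.List.pyGet? tape (-3) with
    | some a, some b => fsTapeLoop k (tape ++ [PySem.Int.mod (a + b) 2])
    | _, _ => tape                           -- IndexError (len < 3, unreachable under Pre_)

def feedback_shift_list_alt (bits_seed : List Int) : List (List Int) × List Int :=
  let n := bits_seed.length
  if n = 0 then ([bits_seed], [])
  else
    let steps := 2 ^ n - 1
    let tape := fsTapeLoop steps bits_seed.reverse    -- bits_seed[::-1] then the append loop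
    ((List.range (steps + 1)).map (fun (k : Nat) =>
        (PySem.List.slice tape (some ((k : Int))) (some ((k : Int) + (n : Int)))).reverse),
     PySem.List.slice tape none (some (steps : Int)))

-- ===== PRECONDITION & SPEC =====
-- Pre_ excludes exactly the seeds of length 1 or 2, on which A raises IndexError (bits[1] / bits[2]).
def Pre_feedback_shift_list (bits_seed : List Int) : Prop :=
  bits_seed.length = 0 ∨ 3 ≤ bits_seed.length
instance (bits_seed : List Int) : Decidable (Pre_feedback_shift_list bits_seed) := by
  unfold Pre_feedback_shift_list; infer_instance

def pvWitness_feedback_shift_list : List Int := [1, 0, 1]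

def Spec_feedback_shift_list (bits_seed : List Int) (out : List (List Int) × List Int) : Prop :=
  out = feedback_shift_list_alt bits_seed
instance (bits_seed : List Int) (out : List (List Int) × List Int) :
    Decidable (Spec_feedback_shift_list bits_seed out) := by
  unfold Spec_feedback_shift_list; infer_instance

-- ===== CLAIM (what is proved, stated in full; the proofs are below) =====
def Claim_equal_feedback_shift_list : Prop :=
  ∀ (bits_seed : List Int), Dom_feedback_shift_list bits_seed →
    Pre_feedback_shift_list bits_seed →
    Spec_feedback_shift_list bits_seed (feedback_shift_list bits_seed)

-- ===== LEMMAS AND PROOFS =====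

-- mathematical model shared by both proofs: the tape after j steps, the state and output at step j
def fsStep (t : List Int) : List Int :=
  t ++ [PySem.Int.mod (t.reverse.getD 1 0 + t.reverse.getD 2 0) 2]

def fsTape (s : List Int) : Nat → List Int
  | 0 => s.reverse
  | j + 1 => fsStep (fsTape s j)

def fsState (s : List Int) (j : Nat) : List Int := ((fsTape s j).drop j).reverse
def fsOut (s : List Int) (j : Nat) : Int := ((fsTape s j).drop j).getD 0 0

lemma length_fsTape (s : List Int) (j : Nat) : (fsTape s j).length = s.length + j := by
  induction j with
  | zero => simp [fsTape]
  | succ j ih => simp [fsTape, fsStep, ih]; omega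

lemma fsTape_prefix (s : List Int) {j k : Nat} (h : j ≤ k) : fsTape s j <+: fsTape s k := by
  induction k with
  | zero => simp_all
  | succ k ih =>
    rcases Nat.lt_or_ge j (k + 1) with hl | hl
    · exact (ih (by omega)).trans (by simp [fsTape, fsStep])
    · have : j = k + 1 := by omega
      subst this; exact List.prefix_refl _

lemma length_fsState (s : List Int) (j : Nat) : (fsState s j).length = s.length := by
  simp [fsState, length_fsTape]

lemma getD_take (u : List Int) (m i : Nat) (h : i < m) : (u.take m).getD i 0 = u.getD i 0 := by
  simp [List.getD_eq_getElem?_getD, h]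

lemma fsState_eq_take (s : List Int) (j : Nat) :
    fsState s j = (fsTape s j).reverse.take (s.length) := by
  have h := length_fsTape s j
  simp [fsState, List.reverse_drop, h]

lemma pyGet?_one_cons {α : Type} (a b : α) (l : List α) :
    PySem.List.pyGet? (a :: b :: l) 1 = some b := by
  simp [PySem.List.pyGet?, PySem.List.pyIdx?]

lemma pyGet?_two_cons {α : Type} (a b c : α) (l : List α) :
    PySem.List.pyGet? (a :: b :: c :: l) 2 = some c := by
  simp [PySem.List.pyGet?, PySem.List.pyIdx?]
  rw [if_pos (by omega)]
  rfl

-- A's one step, computed on the model state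
lemma feedback_shift_step (s : List Int) (hn : 3 ≤ s.length) (j : Nat) :
    feedback_shift (fsState s j) = some (fsState s (j + 1), fsOut s j) := by
  have hm : (fsTape s j).length = s.length + j := length_fsTape s j
  -- decompose the dropped tape: nonempty, head = output
  have hdl : ((fsTape s j).drop j).length = s.length := by simp [hm]
  obtain ⟨c, rest, hcr⟩ : ∃ c rest, (fsTape s j).drop j = c :: rest := by
    cases h : (fsTape s j).drop j with
    | nil => rw [h] at hdl; simp at hdl; omega
    | cons c rest => exact ⟨c, rest, rfl⟩
  -- shape of the state: at least three elements
  obtain ⟨a, b, c', r, hshape⟩ : ∃ a b c' r, fsState s j = a :: b :: c' :: r := by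
    have hl := length_fsState s j
    cases h1 : fsState s j with
    | nil => rw [h1] at hl; simp at hl; omega
    | cons a t1 =>
      cases h2 : t1 with
      | nil => rw [h1, h2] at hl; simp at hl; omega
      | cons b t2 =>
        cases h3 : t2 with
        | nil => rw [h1, h2, h3] at hl; simp at hl; omega
        | cons c' r => exact ⟨a, b, c', r, rfl⟩
  -- the two feedback taps agree with the model's taps
  have htap1 : (fsTape s j).reverse.getD 1 0 = b := by
    have h1 := getD_take ((fsTape s j).reverse) s.length 1 (by omega)
    rw [← fsState_eq_take, hshape] at h1
    rw [← h1]; rfl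
  have htap2 : (fsTape s j).reverse.getD 2 0 = c' := by
    have h1 := getD_take ((fsTape s j).reverse) s.length 2 (by omega)
    rw [← fsState_eq_take, hshape] at h1
    rw [← h1]; rfl
  -- run A's step on the state
  have hst : fsState s j = (rest.reverse ++ [c]) := by
    simp [fsState, hcr]
  have hpop : PySem.List.pop? (fsState s j) = some (c, rest.reverse) := by
    rw [hst]; exact PySem.List.pop?_last _ _
  have hget1 : PySem.List.pyGet? (fsState s j) 1 = some b := by
    rw [hshape]; exact pyGet?_one_cons _ _ _
  have hget2 : PySem.List.pyGet? (fsState s j) 2 = some c' := by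
    rw [hshape]; exact pyGet?_two_cons _ _ _ _
  -- the new state and the output
  have hnew : fsState s (j + 1) =
      PySem.Int.mod (b + c') 2 :: rest.reverse := by
    have hdrop : (fsTape s (j + 1)).drop (j + 1)
        = (fsTape s j).drop (j + 1) ++ [PySem.Int.mod ((fsTape s j).reverse.getD 1 0 + (fsTape s j).reverse.getD 2 0) 2] := by
      show ((fsTape s j) ++ _).drop (j+1) = _
      rw [List.drop_append_of_le_length (by omega)]
    have htl : (fsTape s j).drop (j + 1) = rest := by
      rw [← List.tail_drop, hcr]; rfl
    simp only [fsState, hdrop, htl, htap1, htap2, List.reverse_append, List.reverse_cons,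
      List.reverse_nil, List.nil_append, List.cons_append]
  have hout : fsOut s j = c := by simp [fsOut, hcr]
  simp only [feedback_shift, hget1, hget2, hpop, PySem.List.insert_zero]
  rw [hnew, hout]

-- A's loop unrolled against the model
lemma fsLoop_eq (s : List Int) (hn : 3 ≤ s.length) :
    ∀ (k j K : Nat) (bo : List (List Int)) (ro : List Int),
      bo.length = j + 1 → j + k + 1 = K →
      fsLoop (k + 1) K bo ro (fsState s j)
        = (bo ++ (List.range k).map (fun i => fsState s (j + 1 + i)),
           ro ++ (List.range k).map (fun i => fsOut s (j + i))) := by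
  intro k
  induction k with
  | zero =>
    intro j K bo ro hbo hk
    simp [fsLoop, hbo, hk]
  | succ k ih =>
    intro j K bo ro hbo hk
    have hlt : bo.length < K := by omega
    rw [fsLoop, if_pos hlt, feedback_shift_step s hn j]
    show fsLoop (k + 1) K (bo ++ [fsState s (j + 1)]) (ro ++ [fsOut s j]) (fsState s (j + 1)) = _
    rw [ih (j + 1) K _ _ (by simp [hbo]) (by omega)]
    simp only [Prod.mk.injEq]
    constructor
    · rw [List.append_assoc]
      congr 1
      rw [List.range_succ_eq_map, List.map_cons, List.map_map]
      simp only [List.singleton_append]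
      congr 1
      apply List.map_congr_left
      intro i _
      simp [Function.comp]
      congr 1
      omega
    · rw [List.append_assoc]
      congr 1
      rw [List.range_succ_eq_map, List.map_cons, List.map_map]
      simp only [List.singleton_append]
      congr 1
      apply List.map_congr_left
      intro i _
      simp [Function.comp]
      congr 1
      omega

-- B's tape loop equals the model tape
lemma fsTapeLoop_eq (s : List Int) (hn : 3 ≤ s.length) :
    ∀ (k j : Nat), fsTapeLoop k (fsTape s j) = fsTape s (j + k) := by
  intro k
  induction k with
  | zero => intro j; simp [fsTapeLoop]
  | succ k ih =>
    intro j
    have hm : (fsTape s j).length = s.length + j := length_fsTape s j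
    have h2 : PySem.List.pyGet? (fsTape s j) (-2) = some ((fsTape s j).reverse.getD 1 0) := by
      rw [PySem.List.pyGet?_neg_ofNat _ 2 (by omega) (by omega)]
      have : (fsTape s j).reverse.getD 1 0 = (fsTape s j).getD ((fsTape s j).length - 2) 0 := by
        rw [List.getD_eq_getElem _ _ (by simp; omega), List.getD_eq_getElem _ _ (by omega),
          List.getElem_reverse]
        congr 1
      rw [this, List.getD_eq_getElem?_getD, List.getElem?_eq_getElem (by omega)]
      rfl
    have h3 : PySem.List.pyGet? (fsTape s j) (-3) = some ((fsTape s j).reverse.getD 2 0) := by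
      rw [PySem.List.pyGet?_neg_ofNat _ 3 (by omega) (by omega)]
      have : (fsTape s j).reverse.getD 2 0 = (fsTape s j).getD ((fsTape s j).length - 3) 0 := by
        rw [List.getD_eq_getElem _ _ (by simp; omega), List.getD_eq_getElem _ _ (by omega),
          List.getElem_reverse]
        congr 1
      rw [this, List.getD_eq_getElem?_getD, List.getElem?_eq_getElem (by omega)]
      rfl
    rw [fsTapeLoop, h2, h3]
    show fsTapeLoop k (fsStep (fsTape s j)) = _
    have : fsStep (fsTape s j) = fsTape s (j + 1) := rfl
    rw [this, ih (j + 1)]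
    congr 1
    omega

-- elements of the final tape come from earlier tapes
lemma fsTape_getD_stable (s : List Int) {i j k : Nat} (h : j ≤ k) (hi : i < s.length + j) :
    (fsTape s k).getD i 0 = (fsTape s j).getD i 0 := by
  have hpre := fsTape_prefix s h
  have hij : i < (fsTape s j).length := by rw [length_fsTape]; omega
  have hik : i < (fsTape s k).length := by
    rw [length_fsTape]; have := length_fsTape s j; omega
  rw [List.getD_eq_getElem _ _ hij, List.getD_eq_getElem _ _ hik,
    hpre.getElem hij]
  rfl

lemma take_eq_map_range (l : List Int) (m : Nat) (h : m ≤ l.length) (f : Nat → Int)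
    (hf : ∀ i, i < m → l.getD i 0 = f i) : l.take m = (List.range m).map f := by
  apply List.ext_getElem
  · simp; omega
  · intro i h1 h2
    simp only [List.getElem_take, List.getElem_map, List.getElem_range]
    rw [← hf i (by simp at h1; omega), List.getD_eq_getElem _ _ (by simp at h1; omega)]

-- the reversed window of the final tape at position k is the model state at step k
lemma tapeLoop_full (s : List Int) (hn : 3 ≤ s.length) (steps : Nat) :
    fsTapeLoop steps s.reverse = fsTape s steps := by
  have h := fsTapeLoop_eq s hn steps 0
  simp only [show fsTape s 0 = s.reverse from rfl] at h
  simpa using h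

lemma window_eq_state (s : List Int) (steps k : Nat) (hk : k ≤ steps) :
    ((fsTape s steps).drop k).take s.length = (fsTape s k).drop k := by
  obtain ⟨rest', hrest⟩ := fsTape_prefix s hk
  rw [← hrest, List.drop_append_of_le_length (by rw [length_fsTape]; omega)]
  exact List.take_left' (by rw [List.length_drop, length_fsTape]; omega)

-- final assembly
lemma main_eq (s : List Int) (hn : 3 ≤ s.length) :
    feedback_shift_list s = feedback_shift_list_alt s := by
  have hK1 : 1 ≤ 2 ^ s.length := Nat.one_le_two_pow
  have hs0 : fsState s 0 = s := by simp [fsState, fsTape]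
  set steps := 2 ^ s.length - 1 with hsteps
  -- A side
  have hA : feedback_shift_list s
      = (s :: (List.range steps).map (fun i => fsState s (i + 1)),
         (List.range steps).map (fun i => fsOut s i)) := by
    have hfuel : 2 ^ s.length = steps + 1 := by omega
    have h := fsLoop_eq s hn steps 0 (2 ^ s.length) [s] [] rfl (by omega)
    rw [feedback_shift_list]
    rw [show fsLoop (2 ^ s.length) (2 ^ s.length) [s] [] s
        = fsLoop (steps + 1) (2 ^ s.length) [s] [] (fsState s 0) by rw [← hfuel, hs0]]
    rw [h]
    simp only [Prod.mk.injEq]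
    constructor
    · simp only [List.singleton_append, List.cons.injEq, true_and]
      apply List.map_congr_left; intro i _; congr 1; omega
    · simp only [List.nil_append]
      apply List.map_congr_left; intro i _; congr 1; omega
  -- B side
  have hB : feedback_shift_list_alt s
      = ((List.range (steps + 1)).map (fun k => fsState s k),
         (List.range steps).map (fun i => fsOut s i)) := by
    rw [feedback_shift_list_alt]
    simp only [if_neg (by omega : ¬ s.length = 0)]
    rw [tapeLoop_full s hn]
    simp only [Prod.mk.injEq]
    constructor
    · apply List.map_congr_left
      intro k hk
      rw [List.mem_range] at hk
      rw [PySem.List.slice_natCast_add, window_eq_state s steps k (by omega)]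
      rfl
    · rw [PySem.List.slice_to_natCast]
      apply take_eq_map_range _ _ (by rw [length_fsTape]; omega)
      intro i hi
      rw [fsTape_getD_stable s (by omega : i ≤ steps) (by omega)]
      rw [fsOut, List.getD_eq_getElem?_getD, List.getD_eq_getElem?_getD, List.getElem?_drop]
      simp
  rw [hA, hB]
  simp only [Prod.mk.injEq, and_true]
  rw [List.range_succ_eq_map, List.map_cons, List.map_map, hs0]
  exact congrArg (s :: ·) (List.map_congr_left fun i _ => rfl)

-- ===== VERDICT (by name: the statement is the Claim_ definition above) =====
theorem feedback_shift_list_spec : Claim_equal_feedback_shift_list := by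
  intro s _ hpre
  unfold Spec_feedback_shift_list
  rcases hpre with h0 | h3
  · rw [List.length_eq_zero_iff] at h0
    subst h0
    decide
  · exact main_eq s h3
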